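-- pv_equiv track=rewrite | github.com/VaradK62442/algmatch | src/algmatch/stableMatchings/stableMarriageProblem/ties/smtSuperManOptimal.py | _get_tail
-- ===== SOURCE A (Python) =====
-- def _get_tail(pref_list):
--     idx = len(pref_list)-1
--     while idx >= 0:
--         tail = pref_list[idx]
--         if len(tail) > 0:
--             return tail
--         idx -= 1
--     raise ValueError("Pref_list empty")
-- ===== SOURCE B (Python) =====
-- def _get_tail(pref_list):
--     result = None
--     for tail in pref_list:
--         if len(tail) > 0:
--             result = tail
--     if result is None:
--         raise ValueError("Pref_list empty")
--     return result
-- ===== Notes on version B (the rewrite author's own statement) =====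
-- stated objective: alternative
-- what changed: Replaces the backward index-walk with early return by a single forward pass that keeps overwriting an accumulator with each non-empty entry, deciding after the loop.
import Mathlib
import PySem

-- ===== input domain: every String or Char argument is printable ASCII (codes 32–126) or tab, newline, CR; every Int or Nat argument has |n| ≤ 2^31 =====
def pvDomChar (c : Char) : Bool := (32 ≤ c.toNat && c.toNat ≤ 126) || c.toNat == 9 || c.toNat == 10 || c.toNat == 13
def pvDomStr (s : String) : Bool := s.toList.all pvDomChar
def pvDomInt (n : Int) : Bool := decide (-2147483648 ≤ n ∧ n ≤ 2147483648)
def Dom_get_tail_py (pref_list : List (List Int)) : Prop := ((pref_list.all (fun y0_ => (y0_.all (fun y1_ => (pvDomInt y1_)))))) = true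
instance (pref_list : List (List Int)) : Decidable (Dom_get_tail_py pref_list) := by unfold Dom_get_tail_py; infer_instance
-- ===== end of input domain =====

-- B replaces A's backward index-walk with early return by a forward pass that keeps the last non-empty entry (alternative decomposition; return value only).

-- ===== PORT A =====
-- A's while-loop over idx = len-1 … 0; auxA pl n inspects index n-1 and counts down.
def getTailAuxA (pl : List (List Int)) : Nat → Option (List Int)
  | 0 => none
  | n+1 =>
    match pl[n]? with
    | some tail => if tail.length > 0 then some tail else getTailAuxA pl n
    | none => getTailAuxA pl n

-- on inputs where the Python raises (all entries empty) the port returns []; Pre_ excludes them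
def get_tail_py (pref_list : List (List Int)) : List Int :=
  (getTailAuxA pref_list pref_list.length).getD []

-- ===== PORT B =====
def get_tail_py_alt (pref_list : List (List Int)) : List Int :=
  (pref_list.foldl (fun r t => if t.length > 0 then some t else r) none).getD []

-- ===== PRECONDITION & SPEC =====
-- Pre_ excludes exactly the inputs where Python A raises ValueError (every entry empty); B raises there too.
def Pre_get_tail_py (pref_list : List (List Int)) : Prop := ∃ t ∈ pref_list, t ≠ []
instance (pref_list : List (List Int)) : Decidable (Pre_get_tail_py pref_list) := by unfold Pre_get_tail_py; infer_instance
def pvWitness_get_tail_py : List (List Int) := [[1]]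

def Spec_get_tail_py (pref_list : List (List Int)) (out : List Int) : Prop := out = get_tail_py_alt pref_list
instance (pref_list : List (List Int)) (out : List Int) : Decidable (Spec_get_tail_py pref_list out) := by unfold Spec_get_tail_py; infer_instance

-- ===== CLAIM (what is proved, stated in full; the proofs are below) =====
def Claim_equal_get_tail_py : Prop := ∀ (pref_list : List (List Int)), Dom_get_tail_py pref_list → Pre_get_tail_py pref_list → Spec_get_tail_py pref_list (get_tail_py pref_list)

-- ===== LEMMAS AND PROOFS =====
theorem getTailAuxA_eq_foldl_take (pl : List (List Int)) (n : Nat) (hn : n ≤ pl.length) :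
    getTailAuxA pl n = (pl.take n).foldl (fun r t => if t.length > 0 then some t else r) none := by
  induction n with
  | zero => simp [getTailAuxA]
  | succ m ih =>
    have hm : m < pl.length := hn
    have hget : pl[m]? = some pl[m] := List.getElem?_eq_getElem hm
    rw [List.take_succ, hget]
    simp only [getTailAuxA, hget, List.foldl_append, List.foldl_cons, List.foldl_nil,
      Option.toList_some]
    rw [ih (Nat.le_of_lt hm)]

-- ===== VERDICT (by name: the statement is the Claim_ definition above) =====
theorem get_tail_py_spec : Claim_equal_get_tail_py := by
  intro pl _ _
  unfold Spec_get_tail_py get_tail_py get_tail_py_alt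
  rw [getTailAuxA_eq_foldl_take pl pl.length le_rfl, List.take_length]
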